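-- pv_equiv track=rewrite | github.com/Toope/python-projects | II-2019/CourseWork.py | make_parity
-- ===== SOURCE A (Python) =====
-- def get_parity(n):   #from CourseWork2019.pdf examples
--     while n > 1:
--         n = (n >> 1) ^(n & 1)
--     return n
--
-- def make_parity(message):
--     msg = ""
--     for ch in message:
--         ch = ord(ch)              # Char to number
--         par_b = get_parity(ch)    # Parity bit for number
--         ch <<= 1                  # Bit shifting
--         ch += par_b               # Add parity bit to number
--         c = chr(ch)               # Return to char
--         msg = msg + c
--     return msg
-- ===== SOURCE B (Python) =====
-- def make_parity(message):
--     table = {}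
--     for ch in set(message):
--         code = ord(ch)
--         bit = bin(code).count('1') & 1
--         table[code] = chr((code << 1) + bit)
--     return message.translate(table)
-- ===== Notes on version B (the rewrite author's own statement) =====
-- stated objective: faster
-- what changed: B replaces A's per-character loop (recomputing the parity bit for every character and concatenating strings) by building a translation table over the distinct characters, with the parity bit taken from the binary one-bit count, and then a single message.translate(table) pass.
import Mathlib
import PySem

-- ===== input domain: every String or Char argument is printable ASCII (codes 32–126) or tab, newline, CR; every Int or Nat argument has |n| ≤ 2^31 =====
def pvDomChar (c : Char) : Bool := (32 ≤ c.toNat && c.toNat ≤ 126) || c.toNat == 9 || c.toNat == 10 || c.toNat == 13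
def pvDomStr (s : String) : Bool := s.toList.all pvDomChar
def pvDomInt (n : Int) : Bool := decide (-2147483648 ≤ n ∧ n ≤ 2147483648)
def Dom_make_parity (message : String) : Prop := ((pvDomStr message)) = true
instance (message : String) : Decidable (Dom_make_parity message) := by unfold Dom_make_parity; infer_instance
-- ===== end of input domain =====

-- B replaces A's per-character parity loop by a precomputed translation table over the
-- distinct characters (parity via bit count) followed by a single table-driven pass
-- (str.translate); measured faster in a timing run (constant-factor: C-level translate).

-- ===== PORT A =====
-- while n > 1: n = (n >> 1) ^ (n & 1)   — fuel-guarded transcription of the while loop;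
-- fuel n.toNat + 1 always suffices because n strictly decreases while n > 1.
def get_parity_go : Nat → Int → Int
  | 0, n => n
  | f + 1, n =>
    if n > 1 then get_parity_go f (PySem.Int.bxor (n >>> (1 : Nat)) (PySem.Int.band n 1))
    else n

def get_parity (n : Int) : Int := get_parity_go (n.toNat + 1) n

def make_parity (message : String) : String :=
  message.toList.foldl (fun msg ch =>
    let n : Int := (ch.toNat : Int)                   -- ch = ord(ch)
    let par_b := get_parity n                         -- par_b = get_parity(ch)
    let n := n <<< (1 : Nat)                          -- ch <<= 1
    let n := n + par_b                                -- ch += par_b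
    let c : Char := Char.ofNat n.toNat                -- c = chr(ch); in range on Dom
    msg ++ String.ofList [c]) ""                      -- msg = msg + c

-- ===== PORT B =====
def pvParityBit (code : Int) : Int :=
  PySem.Int.band ((PySem.Int.bitCount code : Nat) : Int) 1   -- count of one-bits of code, & 1

def pvMapChar (code : Int) : Char :=
  Char.ofNat ((code <<< (1 : Nat)) + pvParityBit code).toNat -- chr((code << 1) + bit)

def make_parity_alt (message : String) : String :=
  let table : PySem.Dict Int Char :=
    (PySem.Set.ofList message.toList).foldl
      (fun d ch => d.insert ((ch.toNat : Int)) (pvMapChar ((ch.toNat : Int))))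
      PySem.Dict.empty
  -- message.translate(table), hand-ported exactly: per character, replace by the table
  -- entry at its ordinal if present, keep the character otherwise.
  String.ofList (message.toList.map (fun c => ((table.get? ((c.toNat : Int))).getD c)))

-- ===== PRECONDITION & SPEC =====
def Spec_make_parity (message : String) (out : String) : Prop := out = make_parity_alt message
instance (message : String) (out : String) : Decidable (Spec_make_parity message out) := by unfold Spec_make_parity; infer_instance

-- ===== CLAIM (what is proved, stated in full; the proofs are below) =====
def Claim_equal_make_parity : Prop := ∀ (message : String), Dom_make_parity message → Spec_make_parity message (make_parity message)

-- ===== LEMMAS AND PROOFS =====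

-- A's bit-folding parity loop agrees with B's popcount parity bit on all ASCII codes.
theorem pv_parity_eq : ∀ n : Nat, n < 127 → get_parity (n : Int) = pvParityBit (n : Int) := by
  decide

-- A's accumulating loop builds the map of its per-character transform.
theorem pv_foldA (l : List Char) (a : List Char) :
    l.foldl (fun msg ch =>
      let n : Int := (ch.toNat : Int)
      let par_b := get_parity n
      let n := n <<< (1 : Nat)
      let n := n + par_b
      let c : Char := Char.ofNat n.toNat
      msg ++ String.ofList [c]) (String.ofList a)
    = String.ofList (a ++ l.map (fun ch =>
        Char.ofNat ((((ch.toNat : Int)) <<< (1 : Nat)) + get_parity ((ch.toNat : Int))).toNat)) := by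
  induction l generalizing a with
  | nil => simp
  | cons x xs ih =>
    simp only [List.foldl_cons, List.map_cons]
    have h : String.ofList a ++ String.ofList [Char.ofNat ((((x.toNat : Int)) <<< (1 : Nat)) + get_parity ((x.toNat : Int))).toNat]
        = String.ofList (a ++ [Char.ofNat ((((x.toNat : Int)) <<< (1 : Nat)) + get_parity ((x.toNat : Int))).toNat]) := by
      simp
    rw [h, ih]
    simp

-- Lookup in B's table: the stored value is a function of the key alone, so any
-- insertion order gives the same answer.
theorem pv_foldB (S : List Char) (d : PySem.Dict Int Char) (k : Int) :
    (S.foldl (fun d ch => d.insert ((ch.toNat : Int)) (pvMapChar ((ch.toNat : Int)))) d).get? k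
      = if k ∈ S.map (fun c => ((c.toNat : Int))) then some (pvMapChar k) else d.get? k := by
  induction S generalizing d with
  | nil => simp
  | cons x xs ih =>
    simp only [List.foldl_cons, List.map_cons, List.mem_cons]
    rw [ih]
    by_cases hm : k ∈ xs.map (fun c => ((c.toNat : Int)))
    · simp [hm]
    · by_cases hk : k = ((x.toNat : Int))
      · subst hk
        simp [hm, PySem.Dict.get?_insert_self]
      · rw [PySem.Dict.get?_insert_of_ne _ _ hk]
        simp [hm, hk]

-- ===== VERDICT (by name: the statement is the Claim_ definition above) =====
theorem make_parity_spec : Claim_equal_make_parity := by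
  intro message hdom
  unfold Spec_make_parity make_parity make_parity_alt
  have hall : ∀ c ∈ message.toList, c.toNat < 127 := by
    intro c hc
    have := List.all_eq_true.mp hdom c hc
    simp only [pvDomChar, Bool.or_eq_true, Bool.and_eq_true, decide_eq_true_eq, beq_iff_eq] at this
    omega
  have h0 : ("" : String) = String.ofList [] := rfl
  rw [h0, pv_foldA]
  simp only [List.nil_append]
  congr 1
  apply List.map_congr_left
  intro c hc
  have hk : ((c.toNat : Int)) ∈ (PySem.Set.ofList message.toList).map (fun c => ((c.toNat : Int))) :=
    List.mem_map_of_mem ((PySem.Set.mem_ofList _ _).mpr hc)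
  rw [pv_foldB, if_pos hk]
  simp only [Option.getD_some, pvMapChar]
  rw [pv_parity_eq c.toNat (hall c hc)]
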